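-- pv_equiv track=rewrite | github.com/tempo20/RAG_trial | chatter.py | format_provenance
-- ===== SOURCE A (Python) =====
-- def build_citation_map(chunks: list[dict]) -> dict[str, str]:
--     mapping: dict[str, str] = {}
--     next_idx = 1
--     for chunk in chunks:
--         chunk_uid = chunk.get("chunk_uid")
--         if not chunk_uid or chunk_uid in mapping:
--             continue
--         mapping[chunk_uid] = f"S{next_idx}"
--         next_idx += 1
--     return mapping
--
-- def format_provenance(chunks: list[dict]) -> str:
--     if not chunks:
--         return "Why this answer: no retrieved evidence."
--     citation_map = build_citation_map(chunks)
--     lines = [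
--         "Why this answer:",
--         "  [M] = market price data (FMP/Yahoo feed) — NOT from article database",
--     ]
--     for chunk in chunks:
--         chunk_uid = chunk.get("chunk_uid")
--         if not chunk_uid:
--             continue
--         lines.append(
--             f"- [{citation_map[chunk_uid]}] {chunk.get('source', '?')} | "
--             f"{chunk.get('title', '?')} | retrieval={chunk.get('retrieval_kind', '?')} | chunk={chunk_uid}"
--         )
--         if chunk.get("macro_summary"):
--             lines.append(f"  macro={chunk['macro_summary']}")
--         if chunk.get("evidence_text"):
--             lines.append(f"  evidence={chunk['evidence_text']}")
--     return "\n".join(lines)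
-- ===== SOURCE B (Python) =====
-- def format_provenance(chunks: list[dict]) -> str:
--     if not chunks:
--         return "Why this answer: no retrieved evidence."
--     out = "Why this answer:\n  [M] = market price data (FMP/Yahoo feed) — NOT from article database"
--     labels: dict[str, str] = {}
--     next_idx = 1
--     for chunk in chunks:
--         chunk_uid = chunk.get("chunk_uid")
--         if not chunk_uid:
--             continue
--         if chunk_uid not in labels:
--             labels[chunk_uid] = f"S{next_idx}"
--             next_idx += 1
--         out += (
--             f"\n- [{labels[chunk_uid]}] {chunk.get('source', '?')} | "
--             f"{chunk.get('title', '?')} | retrieval={chunk.get('retrieval_kind', '?')} | chunk={chunk_uid}"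
--         )
--         macro = chunk.get("macro_summary")
--         if macro:
--             out += f"\n  macro={macro}"
--         evidence = chunk.get("evidence_text")
--         if evidence:
--             out += f"\n  evidence={evidence}"
--     return out
-- ===== Notes on version B (the rewrite author's own statement) =====
-- stated objective: simpler
-- what changed: B inlines build_citation_map and fuses the two passes into one loop that assigns citation labels lazily on first sight of each uid while accumulating the output string directly, instead of pre-building a uid->label map and a list of lines joined at the end.
import Mathlib
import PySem

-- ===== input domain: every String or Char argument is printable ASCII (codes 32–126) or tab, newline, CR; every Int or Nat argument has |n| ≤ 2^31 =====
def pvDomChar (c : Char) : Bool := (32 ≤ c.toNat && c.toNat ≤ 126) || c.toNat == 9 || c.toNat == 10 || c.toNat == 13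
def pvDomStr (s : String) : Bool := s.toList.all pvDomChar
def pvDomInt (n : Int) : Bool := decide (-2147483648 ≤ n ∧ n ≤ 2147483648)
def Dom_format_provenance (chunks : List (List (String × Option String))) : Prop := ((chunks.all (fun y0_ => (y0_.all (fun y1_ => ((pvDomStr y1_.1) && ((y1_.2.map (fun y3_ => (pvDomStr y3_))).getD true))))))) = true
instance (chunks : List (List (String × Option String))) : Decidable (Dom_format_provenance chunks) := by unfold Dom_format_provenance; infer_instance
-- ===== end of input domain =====

-- B fuses A's two passes into one loop that assigns citation labels lazily and
-- accumulates the output string directly instead of building a list of lines and joining.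

-- Shared Python-semantics helpers (each chunk is a Python dict; values may be None).
-- chunk.get(k) : a Python dict built from the pairs (duplicate keys overwrite)
def pvGet (c : List (String × Option String)) (k : String) : Option (Option String) :=
  (PySem.Dict.ofList c).get? k

-- f-string rendering of a stored value (None prints as "None")
def pvRender : Option String → String
  | none => "None"
  | some s => s

-- chunk.get(k, '?') rendered into the line
def pvGetS (c : List (String × Option String)) (k : String) : String :=
  match pvGet c k with
  | some v => pvRender v
  | none => "?"

-- 'chunk.get(k)' when used as a truthiness test: some s exactly when the value is a non-empty string
def pvTruthy (c : List (String × Option String)) (k : String) : Option String :=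
  match pvGet c k with
  | some (some s) => if s == "" then none else some s
  | _ => none

-- the '- [label] …' body line for a chunk with truthy uid u and label lab
def pvLine (lab u : String) (c : List (String × Option String)) : String :=
  "- [" ++ lab ++ "] " ++ pvGetS c "source" ++ " | " ++ pvGetS c "title" ++
  " | retrieval=" ++ pvGetS c "retrieval_kind" ++ " | chunk=" ++ u

def pvHeader1 : String := "Why this answer:"
def pvHeader2 : String := "  [M] = market price data (FMP/Yahoo feed) — NOT from article database"

-- ===== PORT A =====
-- build_citation_map's loop (state: mapping, next_idx)
def bcmGo (m : PySem.Dict String String) (i : Int) :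
    List (List (String × Option String)) → PySem.Dict String String
  | [] => m
  | c :: cs =>
    match pvTruthy c "chunk_uid" with
    | none => bcmGo m i cs
    | some u =>
      if m.contains u then bcmGo m i cs
      else bcmGo (m.insert u ("S" ++ PySem.Int.toStr i)) (i + 1) cs

def build_citation_map (chunks : List (List (String × Option String))) : PySem.Dict String String :=
  bcmGo PySem.Dict.empty 1 chunks

-- the formatting loop of A, appending lines (citation_map[chunk_uid] always
-- succeeds — the map was built from the same chunks — so the getD default is unreachable)
def aBody (m : PySem.Dict String String) :
    List (List (String × Option String)) → List String
  | [] => []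
  | c :: cs =>
    match pvTruthy c "chunk_uid" with
    | none => aBody m cs
    | some u =>
      pvLine ((m.get? u).getD "") u c ::
      ((match pvTruthy c "macro_summary" with
        | some s => ["  macro=" ++ s]
        | none => []) ++
       (match pvTruthy c "evidence_text" with
        | some s => ["  evidence=" ++ s]
        | none => []) ++
       aBody m cs)

def format_provenance (chunks : List (List (String × Option String))) : String :=
  if chunks = [] then "Why this answer: no retrieved evidence."
  else
    PySem.Str.join "\n"
      (pvHeader1 :: pvHeader2 :: aBody (build_citation_map chunks) chunks)

-- ===== PORT B =====
-- B's single loop: state (out, labels, next_idx); labels assigned on first sight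
def bGo (out : String) (labels : PySem.Dict String String) (i : Int) :
    List (List (String × Option String)) → String
  | [] => out
  | c :: cs =>
    match pvTruthy c "chunk_uid" with
    | none => bGo out labels i cs
    | some u =>
      let st := if labels.contains u then (labels, i)
                else (labels.insert u ("S" ++ PySem.Int.toStr i), i + 1)
      let out1 := out ++ "\n" ++ pvLine ((st.1.get? u).getD "") u c
      let out2 := match pvTruthy c "macro_summary" with
                  | some s => out1 ++ "\n  macro=" ++ s
                  | none => out1
      let out3 := match pvTruthy c "evidence_text" with
                  | some s => out2 ++ "\n  evidence=" ++ s
                  | none => out2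
      bGo out3 st.1 st.2 cs

def format_provenance_alt (chunks : List (List (String × Option String))) : String :=
  if chunks = [] then "Why this answer: no retrieved evidence."
  else bGo (pvHeader1 ++ "\n" ++ pvHeader2) PySem.Dict.empty 1 chunks

-- ===== PRECONDITION & SPEC =====
def Spec_format_provenance (chunks : List (List (String × Option String))) (out : String) : Prop := out = format_provenance_alt chunks
instance (chunks : List (List (String × Option String))) (out : String) : Decidable (Spec_format_provenance chunks out) := by unfold Spec_format_provenance; infer_instance

-- ===== CLAIM (what is proved, stated in full; the proofs are below) =====
def Claim_equal_format_provenance : Prop := ∀ (chunks : List (List (String × Option String))), Dom_format_provenance chunks → Spec_format_provenance chunks (format_provenance chunks)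

-- ===== LEMMAS AND PROOFS =====

-- "\n" ++ l for each line l, concatenated
def tailStr : List String → String
  | [] => ""
  | l :: ls => "\n" ++ l ++ tailStr ls

theorem join_eq_tailStr (x : String) (ls : List String) :
    PySem.Str.join "\n" (x :: ls) = x ++ tailStr ls := by
  induction ls generalizing x with
  | nil => simp [PySem.Str.join, PySem.Chars.join, List.intercalate, tailStr]
  | cons y ys ih =>
    have h := congrArg String.toList (ih y)
    apply String.toList_inj.mp
    simp only [PySem.Str.join, String.toList_ofList, List.map_cons,
      PySem.Chars.join, List.intercalate] at h ⊢
    simp only [tailStr, String.toList_append] at h ⊢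
    rw [show "\n".toList = ['\n'] from rfl] at h
    simp [h]

-- keys already present keep their label through the rest of the map-building loop
theorem bcmGo_get?_of_contains (cs : List (List (String × Option String)))
    (m : PySem.Dict String String) (i : Int) (u : String) (h : m.contains u = true) :
    (bcmGo m i cs).get? u = m.get? u := by
  induction cs generalizing m i with
  | nil => rfl
  | cons c cs ih =>
    simp only [bcmGo]
    cases pvTruthy c "chunk_uid" with
    | none => exact ih m i h
    | some v =>
      by_cases hv : m.contains v = true
      · simp [hv, ih m i h]
      · simp only [hv, if_false, Bool.false_eq_true]
        rw [ih _ _ (by simp [PySem.Dict.contains_insert, h])]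
        have : u ≠ v := fun e => hv (e ▸ h)
        rw [PySem.Dict.get?_insert_of_ne _ _ this]

-- the heart: B's fused loop equals A's lookup loop against the map the prefix-state builds
theorem main_lemma (cs : List (List (String × Option String)))
    (m : PySem.Dict String String) (i : Int) (out : String) :
    bGo out m i cs = out ++ tailStr (aBody (bcmGo m i cs) cs) := by
  induction cs generalizing m i out with
  | nil => simp [bGo, aBody, tailStr]
  | cons c cs ih =>
    cases hu : pvTruthy c "chunk_uid" with
    | none =>
      simp only [bGo, bcmGo, aBody, hu]
      exact ih m i out
    | some u =>
      by_cases hc : m.contains u = true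
      · simp only [bGo, bcmGo, aBody, hu, hc, if_true]
        rw [ih m i, bcmGo_get?_of_contains cs m i u hc]
        apply String.toList_inj.mp
        cases hm : pvTruthy c "macro_summary" <;>
          cases he : pvTruthy c "evidence_text" <;>
            simp [tailStr, String.toList_append]
      · simp only [bGo, bcmGo, aBody, hu, hc, if_false, Bool.false_eq_true]
        rw [ih _ _,
          bcmGo_get?_of_contains cs _ _ u (PySem.Dict.contains_insert_self m u _),
          PySem.Dict.get?_insert_self]
        apply String.toList_inj.mp
        cases hm : pvTruthy c "macro_summary" <;>
          cases he : pvTruthy c "evidence_text" <;>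
            simp [tailStr, String.toList_append]

-- ===== VERDICT (by name: the statement is the Claim_ definition above) =====
theorem format_provenance_spec : Claim_equal_format_provenance := by
  intro chunks _
  unfold Spec_format_provenance format_provenance format_provenance_alt
  by_cases h : chunks = []
  · simp [h]
  · simp only [h, if_false]
    rw [join_eq_tailStr, main_lemma]
    apply String.toList_inj.mp
    simp [tailStr, build_citation_map, String.toList_append]
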